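-- pv_equiv track=rewrite | github.com/MichalDrosio/python-basic | CodersWars/sort_strings_by_most_contiguosu_volwels.py | sort_strings_by_vowels
-- ===== SOURCE A (Python) =====
-- def sort_strings_by_vowels(seq):
--     vowels = ['a', 'e', 'i', 'o', 'u', 'A', 'E', 'I', 'O', 'U']
--
--     vp = []
--     out = []
--
--     count, res = 0, 0
--
--     for st in seq:
--
--         for i in range(len(st)):
--
--             if st[i] in vowels:
--
--                 count += 1
--
--             else:
--
--                 res = max(res, count)  # compare two value and store the max to res
--
--                 count = 0
--
--         vowel_ct = max(res, count)
--         vp.append((st, vowel_ct))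
--         res, count = 0, 0
--
--     sort_vp = sorted(vp, key=lambda x: x[1], reverse=True)
--
--     for i in sort_vp:
--         out.append(i[0])
--
--     return (out)
-- ===== SOURCE B (Python) =====
-- def sort_strings_by_vowels(seq):
--     vowels = "aeiouAEIOU"
--
--     def longest_run(st):
--         masked = "".join(c if c in vowels else " " for c in st)
--         return max((len(word) for word in masked.split()), default=0)
--
--     return sorted(seq, key=longest_run, reverse=True)
-- ===== Notes on version B (the rewrite author's own statement) =====
-- stated objective: simpler
-- what changed: A scans each string by index with running count/res accumulators threaded (and reset) through the outer loop, builds a (string, count) pair list, sorts it and re-extracts the strings; B masks non-vowels to spaces, materializes the maximal vowel runs with str.split, takes the longest run length (default 0) and uses it directly as a key for sorted(..., reverse=True).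
import Mathlib
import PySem

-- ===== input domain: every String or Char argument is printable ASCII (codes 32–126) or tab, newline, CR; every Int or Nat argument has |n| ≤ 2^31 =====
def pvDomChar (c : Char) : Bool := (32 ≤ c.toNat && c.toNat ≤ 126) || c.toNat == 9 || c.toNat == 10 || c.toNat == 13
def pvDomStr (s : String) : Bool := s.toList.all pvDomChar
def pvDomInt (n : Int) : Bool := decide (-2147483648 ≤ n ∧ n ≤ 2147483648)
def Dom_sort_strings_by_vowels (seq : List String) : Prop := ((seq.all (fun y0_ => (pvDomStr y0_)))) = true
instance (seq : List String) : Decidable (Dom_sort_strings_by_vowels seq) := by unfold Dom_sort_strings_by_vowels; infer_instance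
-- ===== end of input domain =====

-- B replaces A's index loop with running count/res accumulators by a materialize-the-runs
-- decomposition (mask non-vowels to spaces, split, take the longest chunk, default 0) used as a
-- sort key: objective 'simpler', same asymptotic cost.

-- ===== PORT A =====
def pvVowels : List Char := ['a', 'e', 'i', 'o', 'u', 'A', 'E', 'I', 'O', 'U']

-- body of A's 'for st in seq' loop; state = (vp, count, res)
def pvStepA (acc : List (String × Int) × Int × Int) (st : String) : List (String × Int) × Int × Int :=
  let inner := (PySem.List.pyRange 0 (PySem.Str.len st) 1).foldl
      (fun (cr : Int × Int) i =>
        if pvVowels.contains (PySem.List.pyGetD st.toList i ' ')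
        then (cr.1 + 1, cr.2)                -- count += 1
        else (0, max cr.2 cr.1))             -- res = max(res, count); count = 0
      (acc.2.1, acc.2.2)
  (acc.1 ++ [(st, max inner.2 inner.1)], 0, 0)   -- vowel_ct = max(res, count); reset

def sort_strings_by_vowels (seq : List String) : List String :=
  let r := seq.foldl pvStepA ([], 0, 0)
  let sort_vp := PySem.List.sorted r.1 (fun x => x.2) true
  sort_vp.foldl (fun out i => out ++ [i.1]) []

-- ===== PORT B =====
def pvIsVowel (c : Char) : Bool := "aeiouAEIOU".toList.contains c

def pvLongestRun (st : String) : Int :=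
  -- ''.join(c if c in vowels else ' ' for c in st): character-wise map, exact
  let masked := st.toList.map (fun c => if pvIsVowel c then c else ' ')
  PySem.List.maxD ((PySem.Chars.split₀ masked).map (fun w => (w.length : Int))) (fun x => x) 0

def sort_strings_by_vowels_alt (seq : List String) : List String :=
  PySem.List.sorted seq pvLongestRun true

-- ===== PRECONDITION & SPEC =====
def Spec_sort_strings_by_vowels (seq : List String) (out : List String) : Prop := out = sort_strings_by_vowels_alt seq
instance (seq : List String) (out : List String) : Decidable (Spec_sort_strings_by_vowels seq out) := by unfold Spec_sort_strings_by_vowels; infer_instance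

-- ===== CLAIM (what is proved, stated in full; the proofs are below) =====
def Claim_equal_sort_strings_by_vowels : Prop := ∀ (seq : List String), Dom_sort_strings_by_vowels seq → Spec_sort_strings_by_vowels seq (sort_strings_by_vowels seq)

-- ===== LEMMAS AND PROOFS =====

-- A's per-string key, started from count = res = 0
def pvKeyA (st : String) : Int := ((pvStepA ([], 0, 0) st).1.headI).2

-- proof-only: A's count/res scan expressed as structural recursion over the characters
def pvAmax (count : Int) : List Char → Int
  | [] => count
  | c :: cs => if pvVowels.contains c then pvAmax (count + 1) cs else max count (pvAmax 0 cs)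

-- proof-only: lengths of the maximal vowel runs, the first extended by k
def pvRuns (k : Nat) : List Char → List Int
  | [] => if k = 0 then [] else [(k : Int)]
  | c :: cs => if pvVowels.contains c then pvRuns (k + 1) cs
               else if k = 0 then pvRuns 0 cs else (k : Int) :: pvRuns 0 cs

theorem pvIsVowel_eq (c : Char) : pvIsVowel c = pvVowels.contains c := rfl

theorem pvVowel_not_space {c : Char} (h : pvVowels.contains c = true) :
    PySem.Chars.isspace c = false := by
  have hm : c ∈ pvVowels := by simpa using h
  fin_cases hm <;> decide

theorem pvAmax_fold (cs : List Char) : ∀ count res : Int,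
    max (cs.foldl
        (fun (cr : Int × Int) c =>
          if pvVowels.contains c then (cr.1 + 1, cr.2) else (0, max cr.2 cr.1))
        (count, res)).2
      (cs.foldl
        (fun (cr : Int × Int) c =>
          if pvVowels.contains c then (cr.1 + 1, cr.2) else (0, max cr.2 cr.1))
        (count, res)).1 = max res (pvAmax count cs) := by
  induction cs with
  | nil => intro count res; simp [pvAmax]
  | cons c cs ih =>
    intro count res
    simp only [List.foldl_cons, pvAmax]
    by_cases h : pvVowels.contains c = true
    · rw [if_pos h, if_pos h]
      exact ih (count + 1) res
    · rw [if_neg h, if_neg h]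
      rw [ih 0 (max res count)]
      omega

theorem pvFoldMax_max (l : List Int) : ∀ a b : Int,
    l.foldl max (max a b) = max a (l.foldl max b) := by
  induction l with
  | nil => intro a b; simp
  | cons c l ih =>
    intro a b
    simp only [List.foldl_cons]
    rw [max_assoc, ih]

theorem pvRuns_pos (cs : List Char) : ∀ k : Nat, ∀ x ∈ pvRuns k cs, 0 < x := by
  induction cs with
  | nil =>
    intro k x hx
    by_cases h : k = 0 <;> simp [pvRuns, h] at hx
    omega
  | cons c cs ih =>
    intro k x hx
    simp only [pvRuns] at hx
    by_cases h : pvVowels.contains c = true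
    · simp only [h, if_true] at hx; exact ih _ x hx
    · simp only [h, if_false, Bool.false_eq_true] at hx
      by_cases hk : k = 0
      · simp only [hk, if_true] at hx; exact ih 0 x hx
      · simp only [hk, if_false] at hx
        rcases List.mem_cons.mp hx with h1 | h1
        · subst h1; exact_mod_cast Nat.pos_of_ne_zero hk
        · exact ih 0 x h1

theorem pvAmax_runs (cs : List Char) : ∀ k : Nat,
    pvAmax (k : Int) cs = (pvRuns k cs).foldl max 0 := by
  induction cs with
  | nil =>
    intro k
    by_cases h : k = 0 <;> simp [pvAmax, pvRuns, h]
  | cons c cs ih =>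
    intro k
    simp only [pvAmax, pvRuns]
    have h0 : pvAmax 0 cs = (pvRuns 0 cs).foldl max 0 := by simpa using ih 0
    by_cases h : pvVowels.contains c = true
    · rw [if_pos h, if_pos h]
      have := ih (k + 1)
      push_cast at this
      exact this
    · rw [if_neg h, if_neg h]
      by_cases hk : k = 0
      · rw [if_pos hk, hk]
        simp only [Nat.cast_zero]
        rw [h0]
        have := (PySem.List.le_foldl_max (pvRuns 0 cs) (0 : Int)).1
        omega
      · rw [if_neg hk, List.foldl_cons]
        have h1 : max (0 : Int) (k : Int) = max (k : Int) 0 := by omega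
        rw [h1, pvFoldMax_max (pvRuns 0 cs) (k : Int) 0, h0]

theorem pvGo_spec (cs : List Char) : ∀ (cur : List Char) (acc : List (List Char)),
    (PySem.Chars.split₀.go (cs.map (fun c => if pvIsVowel c then c else ' ')) cur acc).map
        (fun w => (w.length : Int))
      = acc.reverse.map (fun w => (w.length : Int)) ++ pvRuns cur.length cs := by
  induction cs with
  | nil =>
    intro cur acc
    simp only [List.map_nil, PySem.Chars.split₀.go]
    by_cases h : cur = []
    · simp [h, pvRuns]
    · have : cur.isEmpty = false := by simpa [List.isEmpty_iff] using h
      have hl : cur.length ≠ 0 := by simpa [List.length_eq_zero_iff] using h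
      simp [this, pvRuns, hl]
  | cons c cs ih =>
    intro cur acc
    simp only [List.map_cons, pvRuns, ← pvIsVowel_eq]
    by_cases h : pvIsVowel c = true
    · have hs : PySem.Chars.isspace c = false := pvVowel_not_space (by rwa [← pvIsVowel_eq])
      simp only [h, if_true, PySem.Chars.split₀.go, hs, Bool.false_eq_true, if_false]
      simpa using ih (c :: cur) acc
    · simp only [h, if_false, Bool.false_eq_true, PySem.Chars.split₀.go]
      have hs : PySem.Chars.isspace ' ' = true := by decide
      simp only [hs, if_true]
      by_cases hc : cur = []
      · have : cur.isEmpty = true := by simp [hc]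
        simp [hc, ih [] acc]
      · have he : cur.isEmpty = false := by simpa [List.isEmpty_iff] using hc
        have hl : cur.length ≠ 0 := by simpa [List.length_eq_zero_iff] using hc
        simp only [he, Bool.false_eq_true, if_false, ih [] (cur.reverse :: acc), hl]
        simp

theorem pvMax?_cons (t : List Int) : ∀ m : Int,
    PySem.List.max? (m :: t) (fun x => x) = some (t.foldl max m) := by
  induction t with
  | nil => intro m; simp [PySem.List.max?]
  | cons c t ih =>
    intro m
    have h1 : PySem.List.max? (m :: c :: t) (fun x => x)
        = PySem.List.max? (max m c :: t) (fun x => x) := by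
      simp only [PySem.List.max?, List.foldl_cons]
      congr 1
      by_cases h : m < c
      · simp [h, max_eq_right (le_of_lt h)]
      · simp [h, max_eq_left (by omega : c ≤ m)]
    rw [h1, ih (max m c)]
    simp

theorem pvMaxD_foldl (l : List Int) (hpos : ∀ x ∈ l, 0 < x) :
    PySem.List.maxD l (fun x => x) 0 = l.foldl max 0 := by
  cases l with
  | nil => simp [PySem.List.maxD, PySem.List.max?]
  | cons x t =>
    simp only [PySem.List.maxD, pvMax?_cons, Option.getD_some, List.foldl_cons]
    have hx : (0 : Int) < x := hpos x List.mem_cons_self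
    rw [max_eq_right (le_of_lt hx)]

theorem pvKey_eq (st : String) : pvKeyA st = pvLongestRun st := by
  unfold pvKeyA pvStepA pvLongestRun
  simp only [PySem.Str.len]
  rw [PySem.List.foldl_pyRange_zero_pyGetD' st.toList ' '
      (fun (cr : Int × Int) c =>
        if pvVowels.contains c then (cr.1 + 1, cr.2) else (0, max cr.2 cr.1)) ((0 : Int), (0 : Int))]
  simp only [List.nil_append, List.headI]
  rw [pvAmax_fold st.toList 0 0]
  rw [PySem.Chars.split₀]
  rw [pvGo_spec st.toList [] []]
  simp only [List.reverse_nil, List.map_nil, List.nil_append, List.length_nil]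
  rw [pvMaxD_foldl _ (pvRuns_pos st.toList 0)]
  have h := pvAmax_runs st.toList 0
  simp only [Nat.cast_zero] at h
  rw [h]
  have := (PySem.List.le_foldl_max (pvRuns 0 st.toList) (0 : Int)).1
  omega

theorem pvFold_vp (seq : List String) : ∀ vp : List (String × Int),
    seq.foldl pvStepA (vp, 0, 0) = (vp ++ seq.map (fun st => (st, pvKeyA st)), 0, 0) := by
  induction seq with
  | nil => intro vp; simp
  | cons st seq ih =>
    intro vp
    have hstep : pvStepA (vp, 0, 0) st = (vp ++ [(st, pvKeyA st)], 0, 0) := by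
      unfold pvStepA pvKeyA pvStepA
      simp
    simp only [List.foldl_cons, hstep, ih]
    simp

theorem pvInsertBy_map (f : String → Int) (x : String) (ys : List String) :
    PySem.List.insertBy (fun (a b : String × Int) => decide (b.2 < a.2)) (x, f x)
        (ys.map (fun y => (y, f y)))
      = (PySem.List.insertBy (fun a b => decide (f b < f a)) x ys).map (fun y => (y, f y)) := by
  induction ys with
  | nil => simp [PySem.List.insertBy]
  | cons y ys ih =>
    simp only [List.map_cons, PySem.List.insertBy]
    by_cases h : f y < f x
    · simp [h]
    · simp [h, ih]

theorem pvSorted_pairs (f : String → Int) (xs : List String) :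
    (PySem.List.sorted (xs.map (fun x => (x, f x))) (fun p => p.2) true).map (fun p => p.1)
      = PySem.List.sorted xs f true := by
  rw [PySem.List.sorted_rev_eq_foldl_insertBy, PySem.List.sorted_rev_eq_foldl_insertBy]
  have main : ∀ (l : List String) (acc : List String),
      (l.map (fun x => (x, f x))).foldl
          (fun a p => PySem.List.insertBy (fun (a b : String × Int) => decide (b.2 < a.2)) p a)
          (acc.map (fun y => (y, f y)))
        = (l.foldl (fun a x => PySem.List.insertBy (fun a b => decide (f b < f a)) x a) acc).map
            (fun y => (y, f y)) := by
    intro l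
    induction l with
    | nil => intro acc; simp
    | cons x l ih =>
      intro acc
      simp only [List.map_cons, List.foldl_cons, pvInsertBy_map]
      exact ih _
  have := main xs []
  simp only [List.map_nil] at this
  rw [this, List.map_map]
  have hid : ((fun p : String × Int => p.1) ∘ fun y => (y, f y)) = id := rfl
  rw [hid, List.map_id]

-- ===== VERDICT (by name: the statement is the Claim_ definition above) =====
theorem sort_strings_by_vowels_spec : Claim_equal_sort_strings_by_vowels := by
  intro seq _
  unfold Spec_sort_strings_by_vowels sort_strings_by_vowels sort_strings_by_vowels_alt
  rw [pvFold_vp seq []]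
  simp only [List.nil_append]
  rw [PySem.List.foldl_append_singleton_eq_map (fun (p : String × Int) => p.1)
      (PySem.List.sorted (seq.map fun st => (st, pvKeyA st)) (fun x => x.2) true) []]
  simp only [List.nil_append]
  rw [pvSorted_pairs pvKeyA seq]
  have : pvKeyA = pvLongestRun := funext pvKey_eq
  rw [this]
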